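-- pv_equiv track=rewrite | github.com/vikasboss/grokking-the-coding-interviews | 1_Data_Structures/hashing/lesson6.py | is_formation_possible
-- ===== SOURCE A (Python) =====
-- def is_formation_possible(lst, word):
--     # Write your code here
--     set1 = set(lst)
--     n = len(word)
--     if (n == 0):
--         return True
--     for i in range(n):
--         if word[:i] in set1 and word[i:] in set1:
--             return True
--     return False
-- ===== SOURCE B (Python) =====
-- def is_formation_possible(lst, word):
--     # Different decomposition: iterate over dictionary words as candidate
--     # prefixes instead of over split positions of `word`.
--     n = len(word)
--     if n == 0:
--         return True
--     set1 = set(lst)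
--     for w in lst:
--         if len(w) < n and word.startswith(w) and word[len(w):] in set1:
--             return True
--     return False
-- ===== Notes on version B (the rewrite author's own statement) =====
-- stated objective: faster
-- what changed: B loops over the dictionary words as candidate prefixes (startswith + suffix set lookup) instead of scanning every split index of word and hashing two fresh slices per index.
import Mathlib
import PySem

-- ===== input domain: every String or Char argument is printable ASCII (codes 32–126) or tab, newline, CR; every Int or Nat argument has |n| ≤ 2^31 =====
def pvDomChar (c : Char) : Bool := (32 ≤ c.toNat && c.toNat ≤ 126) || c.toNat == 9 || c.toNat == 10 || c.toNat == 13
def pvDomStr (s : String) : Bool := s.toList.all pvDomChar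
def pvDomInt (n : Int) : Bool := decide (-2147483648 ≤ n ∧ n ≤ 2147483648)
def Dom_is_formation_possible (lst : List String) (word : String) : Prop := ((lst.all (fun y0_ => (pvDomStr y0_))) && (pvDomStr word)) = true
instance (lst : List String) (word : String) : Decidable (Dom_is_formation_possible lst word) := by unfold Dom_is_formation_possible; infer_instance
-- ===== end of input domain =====

-- B iterates over the dictionary words as candidate prefixes (startswith + suffix set lookup)
-- instead of scanning every split index of word; return values agree everywhere (objective: faster, in a timing run's measurement).

-- ===== PORT A =====
def is_formation_possible (lst : List String) (word : String) : Bool :=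
  let set1 := PySem.Set.ofList lst
  let n := PySem.Str.len word
  if n == 0 then true
  else
    (PySem.List.pyRange 0 n 1).any (fun i =>
      PySem.Set.contains set1 (PySem.Str.slice word none (some i)) &&
      PySem.Set.contains set1 (PySem.Str.slice word (some i) none))

-- ===== PORT B =====
def is_formation_possible_alt (lst : List String) (word : String) : Bool :=
  let n := PySem.Str.len word
  if n == 0 then true
  else
    let set1 := PySem.Set.ofList lst
    lst.any (fun w =>
      decide (PySem.Str.len w < n) && PySem.Str.startswith word w &&
      PySem.Set.contains set1 (PySem.Str.slice word (some (PySem.Str.len w)) none))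

-- ===== PRECONDITION & SPEC =====
def Spec_is_formation_possible (lst : List String) (word : String) (out : Bool) : Prop := out = is_formation_possible_alt lst word
instance (lst : List String) (word : String) (out : Bool) : Decidable (Spec_is_formation_possible lst word out) := by unfold Spec_is_formation_possible; infer_instance

-- ===== CLAIM (what is proved, stated in full; the proofs are below) =====
def Claim_equal_is_formation_possible : Prop := ∀ (lst : List String) (word : String), Dom_is_formation_possible lst word → Spec_is_formation_possible lst word (is_formation_possible lst word)

-- ===== LEMMAS AND PROOFS =====

-- word[:i] for a natural i, on the character-list side
theorem slice_prefix_toList (word : String) (i : Nat) :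
    (PySem.Str.slice word none (some (i : Int))).toList = word.toList.take i := by
  simp [PySem.Str.slice]

-- membership form of 'x in set(lst)'
theorem contains_ofList_iff (lst : List String) (x : String) :
    PySem.Set.contains (PySem.Set.ofList lst) x = true ↔ x ∈ lst := by
  simp [pysem]

-- the two existential scans pick out the same splits of word
theorem scans_agree (lst : List String) (word : String) :
    ((PySem.List.pyRange 0 (PySem.Str.len word) 1).any (fun i =>
      PySem.Set.contains (PySem.Set.ofList lst) (PySem.Str.slice word none (some i)) &&
      PySem.Set.contains (PySem.Set.ofList lst) (PySem.Str.slice word (some i) none))) =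
    (lst.any (fun w =>
      decide (PySem.Str.len w < PySem.Str.len word) && PySem.Str.startswith word w &&
      PySem.Set.contains (PySem.Set.ofList lst) (PySem.Str.slice word (some (PySem.Str.len w)) none))) := by
  rw [Bool.eq_iff_iff]
  simp only [List.any_eq_true, Bool.and_eq_true, decide_eq_true_eq,
    PySem.List.mem_pyRange_one, contains_ofList_iff]
  constructor
  · rintro ⟨i, ⟨hi0, hin⟩, hpre, hsuf⟩
    obtain ⟨j, rfl⟩ : ∃ j : Nat, (j : Int) = i := ⟨i.toNat, Int.toNat_of_nonneg hi0⟩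
    have hjn : j < word.toList.length := by
      simp only [PySem.Str.len_eq] at hin; exact_mod_cast hin
    have hlen : PySem.Str.len (PySem.Str.slice word none (some (j : Int))) = (j : Int) := by
      simp only [PySem.Str.len_eq, slice_prefix_toList, List.length_take]
      omega
    refine ⟨PySem.Str.slice word none (some (j : Int)), hpre, ⟨?_, ?_⟩, ?_⟩
    · -- the prefix slice is strictly shorter than word
      rw [hlen]
      simp only [PySem.Str.len_eq]
      exact_mod_cast hjn
    · -- word starts with its own prefix
      rw [PySem.Str.startswith_eq, PySem.Chars.startswith_iff, slice_prefix_toList]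
      exact List.take_prefix _ _
    · -- the suffix tested by B is the same string A tested
      rwa [hlen]
  · rintro ⟨w, hw, ⟨hlt, hpre⟩, hsuf⟩
    have hwl : PySem.Str.len w = (w.toList.length : Int) := by simp [PySem.Str.len_eq]
    have hpl : w.toList <+: word.toList := by
      rw [PySem.Str.startswith_eq, PySem.Chars.startswith_iff] at hpre
      exact hpre
    have hps : PySem.Str.slice word none (some (PySem.Str.len w)) = w := by
      apply String.toList_inj.mp
      rw [hwl, slice_prefix_toList]
      exact (List.prefix_iff_eq_take.mp hpl).symm
    refine ⟨PySem.Str.len w, ⟨?_, ?_⟩, ?_, hsuf⟩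
    · rw [hwl]; exact_mod_cast Nat.zero_le _
    · exact hlt
    · rwa [hps]

-- ===== VERDICT (by name: the statement is the Claim_ definition above) =====
theorem is_formation_possible_spec : Claim_equal_is_formation_possible := by
  intro lst word _
  unfold Spec_is_formation_possible is_formation_possible is_formation_possible_alt
  by_cases h : word.toList.length = 0
  · simp [PySem.Str.len_eq, h]
  · have hne : (PySem.Str.len word == 0) = false := by
      rw [beq_eq_false_iff_ne]
      simp only [PySem.Str.len_eq, ne_eq]
      exact_mod_cast h
    simp only [hne, Bool.false_eq_true, if_false]
    exact scans_agree lst word
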